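-- pv_equiv track=rewrite | github.com/denis-svg/back | lib/urls.py | __uniqueClicks
-- ===== SOURCE A (Python) =====
-- def __uniqueClicks(person_id_dict):
--     urls = {}
--     for person_id in person_id_dict.keys():
--         already_accesed = {}
--         for event in person_id_dict[person_id]:
--             url = event[0]
--             if url not in already_accesed:
--                 if url not in urls:
--                     urls[url] = 1
--                 else:
--                     urls[url] += 1
--             already_accesed[url] = True
--
--     return urls
-- ===== SOURCE B (Python) =====
-- def __uniqueClicks(person_id_dict):
--     urls = {}
--     for person_id, events in person_id_dict.items():
--         for event in events:
--             urls.setdefault(event[0], set()).add(person_id)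
--     return {url: len(persons) for url, persons in urls.items()}
-- ===== Notes on version B (the rewrite author's own statement) =====
-- stated objective: simpler
-- what changed: B accumulates, in one pass over the events, the set of person ids per URL (no per-person already_accessed dict and no first-sighting increment branch), then converts each set to its size in a final comprehension.
import Mathlib
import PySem

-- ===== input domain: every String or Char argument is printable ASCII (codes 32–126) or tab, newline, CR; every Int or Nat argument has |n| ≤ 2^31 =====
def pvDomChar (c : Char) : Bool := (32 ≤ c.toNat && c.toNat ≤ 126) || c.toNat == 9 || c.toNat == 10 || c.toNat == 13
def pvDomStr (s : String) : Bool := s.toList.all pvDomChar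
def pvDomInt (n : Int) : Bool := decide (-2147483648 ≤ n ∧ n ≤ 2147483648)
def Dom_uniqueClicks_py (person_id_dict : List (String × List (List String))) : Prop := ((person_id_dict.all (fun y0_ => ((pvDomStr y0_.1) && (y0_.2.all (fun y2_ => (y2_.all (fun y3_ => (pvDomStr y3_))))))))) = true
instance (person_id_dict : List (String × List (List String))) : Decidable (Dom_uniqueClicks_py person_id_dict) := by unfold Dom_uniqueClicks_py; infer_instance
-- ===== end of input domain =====

-- B replaces A's per-person dedup dict + first-sighting increment with a per-URL set of person ids
-- whose sizes become the counts in a final pass (objective: simpler, same asymptotic cost).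

-- ===== PORT A =====
def uniqueClicks_py (person_id_dict : List (String × List (List String))) : List (String × Int) :=
  ((person_id_dict.map Prod.fst).foldl (fun urls person_id =>
      (((person_id_dict.lookup person_id).getD []).foldl
        (fun (st : PySem.Dict String Int × PySem.Dict String Bool) event =>
          let url := PySem.List.pyGetD event 0 ""
          ((if st.2.contains url = false then
              (if st.1.contains url = false then st.1.insert url 1
               else st.1.modify url 0 (· + 1))
            else st.1),
           st.2.insert url true))
        (urls, PySem.Dict.empty)).1)
    PySem.Dict.empty).items

-- ===== PORT B =====
def uniqueClicks_py_alt (person_id_dict : List (String × List (List String))) : List (String × Int) :=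
  (person_id_dict.foldl (fun urls pe =>
      pe.2.foldl (fun (urls : PySem.Dict String (PySem.Set String)) event =>
        urls.modify (PySem.List.pyGetD event 0 "") PySem.Set.empty (fun s => s.add pe.1)) urls)
    PySem.Dict.empty).items.map (fun pr => (pr.1, PySem.List.len pr.2))

-- ===== PRECONDITION & SPEC =====
-- Pre_ excludes association lists with duplicate person ids (a Python dict cannot contain duplicate
-- keys, so the list representation is only faithful with distinct keys) and inputs containing an
-- empty event (event[0] raises IndexError in both A and B).
def Pre_uniqueClicks_py (person_id_dict : List (String × List (List String))) : Prop :=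
  (person_id_dict.map Prod.fst).Nodup ∧ ∀ pe ∈ person_id_dict, ∀ e ∈ pe.2, e ≠ []
instance (person_id_dict : List (String × List (List String))) : Decidable (Pre_uniqueClicks_py person_id_dict) := by unfold Pre_uniqueClicks_py; infer_instance

def pvWitness_uniqueClicks_py : (List (String × List (List String))) :=
  [("alice", [["u1"], ["u2"], ["u1"]]), ("bob", [["u1"]])]

def Spec_uniqueClicks_py (person_id_dict : List (String × List (List String))) (out : List (String × Int)) : Prop := out = uniqueClicks_py_alt person_id_dict
instance (person_id_dict : List (String × List (List String))) (out : List (String × Int)) : Decidable (Spec_uniqueClicks_py person_id_dict out) := by unfold Spec_uniqueClicks_py; infer_instance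

-- ===== CLAIM (what is proved, stated in full; the proofs are below) =====
def Claim_equal_uniqueClicks_py : Prop := ∀ (person_id_dict : List (String × List (List String))), Dom_uniqueClicks_py person_id_dict → Pre_uniqueClicks_py person_id_dict → Spec_uniqueClicks_py person_id_dict (uniqueClicks_py person_id_dict)

-- ===== LEMMAS AND PROOFS =====

-- per-URL set entry, mapped to its count (what B's final comprehension does)
def pvG (pr : String × PySem.Set String) : String × Int := (pr.1, PySem.List.len pr.2)

-- A's inner-loop body, named for the proofs (definitionally the lambda in uniqueClicks_py)
def pvAStep (st : PySem.Dict String Int × PySem.Dict String Bool) (event : List String) :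
    PySem.Dict String Int × PySem.Dict String Bool :=
  let url := PySem.List.pyGetD event 0 ""
  ((if st.2.contains url = false then
      (if st.1.contains url = false then st.1.insert url 1
       else st.1.modify url 0 (· + 1))
    else st.1),
   st.2.insert url true)

-- B's inner-loop body, named for the proofs
def pvBStep (pid : String) (urls : PySem.Dict String (PySem.Set String)) (event : List String) :
    PySem.Dict String (PySem.Set String) :=
  urls.modify (PySem.List.pyGetD event 0 "") PySem.Set.empty (fun s => s.add pid)

-- the coupling invariant between A's (urls, already_accesed) and B's url → person-set dict,
-- while person p is being processed and the persons in `bad` are still unprocessed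
def pvInv (p : String) (bad : List String)
    (uA : PySem.Dict String Int) (al : PySem.Dict String Bool)
    (uB : PySem.Dict String (PySem.Set String)) : Prop :=
  uA.items = uB.items.map pvG ∧
  uB.keys.Nodup ∧
  (∀ pr ∈ uB.items, (p ∈ pr.2 ↔ al.contains pr.1 = true)) ∧
  (∀ u, al.contains u = true → uB.contains u = true) ∧
  (∀ pr ∈ uB.items, ∀ q ∈ pr.2, q = p ∨ q ∉ bad)

lemma pvLookup_nodup {α : Type} [BEq α] [LawfulBEq α] {β : Type} (l : List (α × β))
    (h : (l.map Prod.fst).Nodup) {pe : α × β} (hm : pe ∈ l) : l.lookup pe.1 = some pe.2 := by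
  induction l with
  | nil => simp at hm
  | cons a t ih =>
      simp only [List.map_cons, List.nodup_cons] at h
      rcases List.mem_cons.1 hm with rfl | hmt
      · simp [List.lookup]
      · have hne : a.1 ≠ pe.1 := fun he => h.1 (he ▸ (List.mem_map_of_mem hmt))
        have hb : (pe.1 == a.1) = false := by simpa using (fun he => hne he.symm : ¬pe.1 = a.1)
        simp only [List.lookup, hb]
        exact ih h.2 hmt

lemma pvInv_step (p : String) (bad : List String)
    (uA : PySem.Dict String Int) (al : PySem.Dict String Bool)
    (uB : PySem.Dict String (PySem.Set String)) (e : List String)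
    (h : pvInv p bad uA al uB) :
    pvInv p bad (pvAStep (uA, al) e).1 (pvAStep (uA, al) e).2 (pvBStep p uB e) := by
  obtain ⟨hitems, hkeys, hiff, hal, hbad⟩ := h
  set w := PySem.List.pyGetD e 0 "" with hw
  have hkeysEq : uA.keys = uB.keys := by
    simp [PySem.Dict.keys, hitems, List.map_map, pvG, Function.comp]
  have hkeysA : uA.keys.Nodup := hkeysEq ▸ hkeys
  have hcontEq : ∀ u, uA.contains u = uB.contains u := by
    intro u
    simp only [PySem.Dict.contains, hitems, List.any_map]
    rfl
  by_cases hal_w : al.contains w = true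
  · -- URL already seen by this person: A leaves urls alone, B's set add is a no-op
    obtain ⟨s, hs⟩ : ∃ s, uB.get? w = some s :=
      Option.isSome_iff_exists.mp
        (by rw [← PySem.Dict.contains_eq_isSome_get?]; exact hal w hal_w)
    have hmemi : (w, s) ∈ uB.items := PySem.Dict.mem_items_of_get?_eq_some _ hs
    have hps : p ∈ s := (hiff (w, s) hmemi).2 hal_w
    have hgd : uB.getD w PySem.Set.empty = s := PySem.Dict.getD_of_get?_eq_some _ _ hs
    have hadd : s.add p = s := by simp [PySem.Set.add, hps]
    have hBeq : uB.insert w ((uB.getD w PySem.Set.empty).add p) = uB := by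
      apply PySem.Dict.ext
      rw [hgd, hadd, PySem.Dict.items_insert_of_contains _ _ (hal w hal_w)]
      conv_rhs => rw [← List.map_id uB.items]
      apply List.map_congr_left
      rintro ⟨k, v⟩ hpr
      by_cases hpw : k = w
      · subst hpw
        have hv : v = s := by
          have h1 := PySem.Dict.get?_of_mem_items _ hpr hkeys
          rw [hs] at h1
          exact (Option.some_injective _ h1).symm
        simp [hv]
      · simp [hpw]
    simp only [pvAStep, pvBStep, PySem.Dict.modify, ← hw, hal_w]
    rw [hBeq]
    refine ⟨hitems, hkeys, ?_, ?_, hbad⟩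
    · rintro ⟨k, v⟩ hpr
      rw [PySem.Dict.contains_insert]
      by_cases hpw : k = w
      · subst hpw
        have hv : v = s := by
          have h1 := PySem.Dict.get?_of_mem_items _ hpr hkeys
          rw [hs] at h1
          exact (Option.some_injective _ h1).symm
        simp [hv, hps]
      · simp only [show (k == w) = false by simpa using hpw, Bool.false_or]
        exact hiff (k, v) hpr
    · intro u hu
      rw [PySem.Dict.contains_insert] at hu
      simp only [Bool.or_eq_true] at hu
      rcases hu with hu | hu
      · exact (eq_of_beq hu) ▸ hal w hal_w
      · exact hal u hu
  · have half : al.contains w = false := by simpa using hal_w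
    by_cases hBw : uB.contains w = true
    · -- URL known globally, new for this person: A increments, B appends p to the set
      obtain ⟨s, hs⟩ : ∃ s, uB.get? w = some s :=
        Option.isSome_iff_exists.mp (by rw [← PySem.Dict.contains_eq_isSome_get?]; exact hBw)
      have hmemi : (w, s) ∈ uB.items := PySem.Dict.mem_items_of_get?_eq_some _ hs
      have hpns : p ∉ s := fun hp => by rw [(hiff (w, s) hmemi).1 hp] at half; exact absurd half (by simp)
      have hgd : uB.getD w PySem.Set.empty = s := PySem.Dict.getD_of_get?_eq_some _ _ hs
      have hadd : s.add p = s ++ [p] := by simp [PySem.Set.add, hpns]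
      have hAw : uA.contains w = true := by rw [hcontEq]; exact hBw
      have hgdA : uA.getD w 0 = (s.length : Int) := by
        have hm2 : (w, (s.length : Int)) ∈ uA.items := by
          rw [hitems]
          have := List.mem_map_of_mem (f := pvG) hmemi
          simpa [pvG, PySem.List.len_eq] using this
        exact PySem.Dict.getD_of_mem_items _ hm2 hkeysA 0
      simp only [pvAStep, pvBStep, PySem.Dict.modify, ← hw, half, hAw, Bool.true_eq_false, if_false, if_true, hgd, hadd, hgdA]
      refine ⟨?_, PySem.Dict.nodup_keys_insert _ _ _ hkeys, ?_, ?_, ?_⟩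
      · rw [PySem.Dict.items_insert_of_contains _ _ hAw, PySem.Dict.items_insert_of_contains _ _ hBw,
          hitems, List.map_map, List.map_map]
        apply List.map_congr_left
        intro pr hpr
        by_cases hpw : pr.1 = w
        · simp [Function.comp, hpw, pvG, PySem.List.len_eq]
        · simp [Function.comp, hpw, pvG]
      · intro pr hpr
        rcases (PySem.Dict.mem_items_insert _ _ _ _).mp hpr with rfl | ⟨hold, hne⟩
        · simp
        · rw [PySem.Dict.contains_insert]
          simp only [show (pr.1 == w) = false by simpa using hne, Bool.false_or]
          exact hiff pr hold
      · intro u hu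
        rw [PySem.Dict.contains_insert] at hu
        rw [PySem.Dict.contains_insert]
        simp only [Bool.or_eq_true] at hu
        rcases hu with hu | hu
        · simp [hu]
        · simp [hal u hu]
      · intro pr hpr q hq
        rcases (PySem.Dict.mem_items_insert _ _ _ _).mp hpr with rfl | ⟨hold, hne⟩
        · rcases List.mem_append.mp hq with hq | hq
          · exact hbad (w, s) hmemi q hq
          · left; simpa using hq
        · exact hbad pr hold q hq
    · -- URL unseen anywhere: A inserts count 1, B inserts the singleton set {p}
      have hBf : uB.contains w = false := by simpa using hBw
      have hAf : uA.contains w = false := by rw [hcontEq]; exact hBf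
      have hgd : uB.getD w PySem.Set.empty = PySem.Set.empty :=
        PySem.Dict.getD_of_not_contains _ _ hBf
      have hadd : (PySem.Set.empty : PySem.Set String).add p = [p] := by
        simp [PySem.Set.add, PySem.Set.empty]
      simp only [pvAStep, pvBStep, PySem.Dict.modify, ← hw, half, hAf, if_true, hgd, hadd]
      refine ⟨?_, PySem.Dict.nodup_keys_insert _ _ _ hkeys, ?_, ?_, ?_⟩
      · rw [PySem.Dict.items_insert_of_not_contains _ _ hAf,
          PySem.Dict.items_insert_of_not_contains _ _ hBf, hitems, List.map_append]
        simp [pvG, PySem.List.len_eq]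
      · intro pr hpr
        rcases (PySem.Dict.mem_items_insert _ _ _ _).mp hpr with rfl | ⟨hold, hne⟩
        · simp
        · rw [PySem.Dict.contains_insert]
          simp only [show (pr.1 == w) = false by simpa using hne, Bool.false_or]
          exact hiff pr hold
      · intro u hu
        rw [PySem.Dict.contains_insert] at hu
        rw [PySem.Dict.contains_insert]
        simp only [Bool.or_eq_true] at hu
        rcases hu with hu | hu
        · simp [hu]
        · simp [hal u hu]
      · intro pr hpr q hq
        rcases (PySem.Dict.mem_items_insert _ _ _ _).mp hpr with rfl | ⟨hold, hne⟩
        · left; simpa using hq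
        · exact hbad pr hold q hq

lemma pvInv_fold (p : String) (bad : List String) (E : List (List String))
    (st : PySem.Dict String Int × PySem.Dict String Bool)
    (uB : PySem.Dict String (PySem.Set String))
    (h : pvInv p bad st.1 st.2 uB) :
    pvInv p bad (E.foldl pvAStep st).1 (E.foldl pvAStep st).2 (E.foldl (pvBStep p) uB) := by
  induction E generalizing st uB with
  | nil => exact h
  | cons e E ih =>
      simpa using ih (pvAStep st e) (pvBStep p uB e)
        (by simpa using pvInv_step p bad st.1 st.2 uB e h)

lemma pvOuter (d l : List (String × List (List String)))
    (hl : ∀ pe ∈ l, d.lookup pe.1 = some pe.2)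
    (hnd : (l.map Prod.fst).Nodup)
    (uA : PySem.Dict String Int) (uB : PySem.Dict String (PySem.Set String))
    (hitems : uA.items = uB.items.map pvG)
    (hkeys : uB.keys.Nodup)
    (hmem : ∀ pr ∈ uB.items, ∀ q ∈ pr.2, q ∉ l.map Prod.fst) :
    ((l.map Prod.fst).foldl (fun urls k =>
        (((d.lookup k).getD []).foldl pvAStep (urls, PySem.Dict.empty)).1) uA).items
      = (l.foldl (fun urls pe => pe.2.foldl (pvBStep pe.1) urls) uB).items.map pvG := by
  induction l generalizing uA uB with
  | nil => simpa using hitems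
  | cons pe rest ih =>
      simp only [List.map_cons, List.nodup_cons] at hnd
      simp only [List.map_cons, List.foldl_cons, hl pe (List.mem_cons_self ..), Option.getD_some]
      have hInv0 : pvInv pe.1 (pe.1 :: rest.map Prod.fst) uA PySem.Dict.empty uB := by
        refine ⟨hitems, hkeys, ?_, ?_, ?_⟩
        · intro pr hpr
          constructor
          · intro hp
            exact absurd (by simp : pe.1 ∈ List.map Prod.fst (pe :: rest))
              (hmem pr hpr pe.1 hp)
          · intro hc
            simp [PySem.Dict.empty, PySem.Dict.contains] at hc
        · intro u hu
          simp [PySem.Dict.empty, PySem.Dict.contains] at hu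
        · intro pr hpr q hq
          right
          simpa using hmem pr hpr q hq
      have hI := pvInv_fold pe.1 (pe.1 :: rest.map Prod.fst) pe.2 (uA, PySem.Dict.empty) uB hInv0
      obtain ⟨hitems', hkeys', _, _, hbad'⟩ := hI
      refine ih ?_ hnd.2 _ _ hitems' hkeys' ?_
      · exact fun q hq => hl q (List.mem_cons_of_mem _ hq)
      · intro pr hpr q hq
        rcases hbad' pr hpr q hq with rfl | hnb
        · exact hnd.1
        · exact fun hr => hnb (List.mem_cons_of_mem _ hr)

-- ===== VERDICT (by name: the statement is the Claim_ definition above) =====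
theorem uniqueClicks_py_spec : Claim_equal_uniqueClicks_py := by
  intro d _hdom hpre
  show uniqueClicks_py d = uniqueClicks_py_alt d
  have := pvOuter d d (fun pe hm => pvLookup_nodup d hpre.1 hm) hpre.1
    PySem.Dict.empty PySem.Dict.empty rfl (by simp [PySem.Dict.keys_empty])
    (by intro pr hpr; simp [PySem.Dict.empty] at hpr)
  exact this
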